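-- pv_equiv track=rewrite | github.com/filipedwan/CodeBench-Features-Extractor | Legacy extractor/tabelas_por_questao/por_questão_erro.py | session
-- ===== SOURCE A (Python) =====
-- def session(codemirror,lista,turma):
-- 	aux1=[]
-- 	for l in lista:
-- 		aux=len(l)-5
-- 		contador=0
-- 		while(contador<len(codemirror)):
-- 			if(l[:aux]==codemirror[contador][:aux]):
-- 				aux1=aux1+[codemirror[contador]]
-- 			contador+=1
-- 	return aux1
-- ===== SOURCE B (Python) =====
-- def session(codemirror, lista, turma):
--     # Index codemirror once per distinct prefix length: one dict lookup per lista item.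
--     buckets = {}
--     for l in lista:
--         a = len(l) - 5
--         if a not in buckets:
--             d = {}
--             for c in codemirror:
--                 d.setdefault(c[:a], []).append(c)
--             buckets[a] = d
--     out = []
--     for l in lista:
--         a = len(l) - 5
--         out.extend(buckets[a].get(l[:a], []))
--     return out
-- ===== Notes on version B (the rewrite author's own statement) =====
-- stated objective: faster
-- what changed: B builds, once per distinct prefix length, a dict grouping codemirror entries by their prefix, then answers each lista item with one hash lookup instead of rescanning codemirror.
import Mathlib
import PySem

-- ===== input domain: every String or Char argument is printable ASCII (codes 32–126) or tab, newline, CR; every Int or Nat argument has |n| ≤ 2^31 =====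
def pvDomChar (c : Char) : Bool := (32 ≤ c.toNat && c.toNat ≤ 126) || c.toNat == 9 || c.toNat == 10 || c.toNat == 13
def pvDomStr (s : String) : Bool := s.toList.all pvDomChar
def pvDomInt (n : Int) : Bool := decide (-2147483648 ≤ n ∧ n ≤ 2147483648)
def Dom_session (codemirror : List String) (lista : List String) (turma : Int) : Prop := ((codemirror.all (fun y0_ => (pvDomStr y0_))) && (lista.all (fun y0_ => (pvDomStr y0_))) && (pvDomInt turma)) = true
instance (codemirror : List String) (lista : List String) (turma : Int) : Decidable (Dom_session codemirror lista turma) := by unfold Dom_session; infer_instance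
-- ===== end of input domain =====

-- B indexes codemirror by prefix in a dict (built once per distinct prefix length),
-- replacing A's rescans of codemirror with one hash lookup per lista item.
-- ===== PORT A =====
def session (codemirror : List String) (lista : List String) (turma : Int) : List String :=
  lista.foldl (fun aux1 l =>
    let aux : Int := (PySem.Str.len l : Int) - 5
    -- while contador < len(codemirror): test codemirror[contador], contador += 1
    codemirror.foldl (fun acc c =>
      if PySem.Str.slice l none (some aux) == PySem.Str.slice c none (some aux)
      then acc ++ [c] else acc) aux1) []

-- ===== PORT B =====
-- d.setdefault(c[:a], []).append(c)  ==  d.modify (c[:a]) [] (· ++ [c])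
def sessionBucket (codemirror : List String) (a : Int) : PySem.Dict String (List String) :=
  codemirror.foldl (fun d c => d.modify (PySem.Str.slice c none (some a)) [] (· ++ [c])) PySem.Dict.empty

def session_alt (codemirror : List String) (lista : List String) (turma : Int) : List String :=
  let buckets := lista.foldl (fun b l =>
    let a : Int := (PySem.Str.len l : Int) - 5
    if b.contains a then b else b.insert a (sessionBucket codemirror a)) PySem.Dict.empty
  lista.foldl (fun out l =>
    let a : Int := (PySem.Str.len l : Int) - 5
    -- buckets[a] never raises: a was inserted in the first loop from the same lista
    out ++ ((buckets.get? a).getD PySem.Dict.empty).getD (PySem.Str.slice l none (some a)) []) []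

-- ===== PRECONDITION & SPEC =====
def Spec_session (codemirror : List String) (lista : List String) (turma : Int) (out : List String) : Prop := out = session_alt codemirror lista turma
instance (codemirror : List String) (lista : List String) (turma : Int) (out : List String) : Decidable (Spec_session codemirror lista turma out) := by unfold Spec_session; infer_instance

-- ===== CLAIM (what is proved, stated in full; the proofs are below) =====
def Claim_equal_session : Prop := ∀ (codemirror : List String) (lista : List String) (turma : Int), Dom_session codemirror lista turma → Spec_session codemirror lista turma (session codemirror lista turma)

-- ===== LEMMAS AND PROOFS =====

-- the per-length bucket answers a lookup with exactly A's inner filter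
theorem sessionBucket_getD (cm : List String) (a : Int) (key : String) :
    (sessionBucket cm a).getD key [] = cm.filter (fun c => PySem.Str.slice c none (some a) == key) := by
  have h : sessionBucket cm a
      = (cm.map (fun c => (PySem.Str.slice c none (some a), c))).foldl
          (fun d p => d.modify p.1 [] (· ++ [p.2])) PySem.Dict.empty := by
    rw [List.foldl_map]
    rfl
  rw [h, PySem.Dict.getD_foldl_modify_append]
  simp [List.filter_map, Function.comp_def]

-- every value stored by the first loop of B is a sessionBucket
theorem sessionPhase1_inv (cm lis : List String) (b : PySem.Dict Int (PySem.Dict String (List String)))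
    (hb : ∀ k v, b.get? k = some v → v = sessionBucket cm k) :
    ∀ k v, (lis.foldl (fun b l =>
        let a : Int := (PySem.Str.len l : Int) - 5
        if b.contains a then b else b.insert a (sessionBucket cm a)) b).get? k = some v →
      v = sessionBucket cm k := by
  induction lis generalizing b with
  | nil => exact hb
  | cons l t ih =>
    rw [List.foldl_cons]
    refine ih _ ?_
    intro k v hv
    dsimp only at hv
    by_cases hc : b.contains ((PySem.Str.len l : Int) - 5)
    · exact hb k v (by rwa [if_pos hc] at hv)
    · rw [if_neg hc, PySem.Dict.get?_insert] at hv
      split_ifs at hv with hk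
      · subst hk; exact (Option.some.inj hv).symm
      · exact hb k v hv

-- contains is preserved by the first loop
theorem sessionPhase1_mono (cm lis : List String) (b : PySem.Dict Int (PySem.Dict String (List String)))
    (k : Int) (hk : b.contains k = true) :
    (lis.foldl (fun b l =>
        let a : Int := (PySem.Str.len l : Int) - 5
        if b.contains a then b else b.insert a (sessionBucket cm a)) b).contains k = true := by
  induction lis generalizing b with
  | nil => exact hk
  | cons l t ih =>
    rw [List.foldl_cons]
    refine ih _ ?_
    dsimp only
    by_cases hc : b.contains ((PySem.Str.len l : Int) - 5)
    · rwa [if_pos hc]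
    · rw [if_neg hc, PySem.Dict.contains_insert, hk]; simp

-- every prefix length occurring in lista has a bucket after the first loop
theorem sessionPhase1_covers (cm lis : List String) (b : PySem.Dict Int (PySem.Dict String (List String)))
    (l : String) (hl : l ∈ lis) :
    (lis.foldl (fun b l =>
        let a : Int := (PySem.Str.len l : Int) - 5
        if b.contains a then b else b.insert a (sessionBucket cm a)) b).contains
      ((PySem.Str.len l : Int) - 5) = true := by
  induction lis generalizing b with
  | nil => cases hl
  | cons x t ih =>
    rw [List.foldl_cons]
    rcases List.mem_cons.mp hl with h | h
    · subst h
      refine sessionPhase1_mono cm t _ _ ?_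
      dsimp only
      by_cases hc : b.contains ((PySem.Str.len l : Int) - 5)
      · rwa [if_pos hc]
      · rw [if_neg hc]; exact PySem.Dict.contains_insert_self _ _ _
    · exact ih _ h

-- ===== VERDICT (by name: the statement is the Claim_ definition above) =====
theorem session_spec : Claim_equal_session := by
  intro codemirror lista turma _
  unfold Spec_session session session_alt
  refine Eq.trans (b := lista.foldl (fun out l =>
      out ++ codemirror.filter (fun c =>
        PySem.Str.slice c none (some ((PySem.Str.len l : Int) - 5)) ==
        PySem.Str.slice l none (some ((PySem.Str.len l : Int) - 5)))) []) ?_ ?_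
  · refine PySem.List.foldl_congr_mem' _ _ _ _ ?_
    intro l _ acc
    dsimp only
    rw [PySem.List.foldl_append_if_eq_filter]
    congr 1
    apply List.filter_congr
    intro c _
    exact Bool.beq_comm
  · refine (PySem.List.foldl_congr_mem' _ _ _ _ ?_).symm
    intro l hl out
    dsimp only
    congr 1
    have hc := sessionPhase1_covers codemirror lista PySem.Dict.empty l hl
    rw [PySem.Dict.contains_eq_isSome_get?] at hc
    obtain ⟨v, hv⟩ := Option.isSome_iff_exists.mp hc
    have hveq := sessionPhase1_inv codemirror lista PySem.Dict.empty
      (by intro k v h; simp [PySem.Dict.get?_empty] at h) _ _ hv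
    subst hveq
    rw [hv, Option.getD_some, sessionBucket_getD]
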